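-- pv_equiv track=rewrite | github.com/EstebanZG999/Algoritmos_Enrutamiento_Redes | src/routerlab/algorithms/dijkstra.py | build_next_hops
-- ===== SOURCE A (Python) =====
-- from typing import Dict, Hashable, Iterable, List, Tuple, Optional
--
-- Node = Hashable
--
-- def reconstruct_path(prev: Dict[Node, Optional[Node]], source: Node, target: Node) -> List[Node]:
--     """
--     Reconstruye la ruta source -> target usando el mapa de predecesores 'prev'.
--     Retorna lista vacía si 'target' es inalcanzable.
--     """
--     path: List[Node] = []
--     cur: Optional[Node] = target
--     while cur is not None:
--         path.append(cur)
--         if cur == source: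
--             break
--         cur = prev.get(cur)
--     path.reverse()
--     if not path or path[0] != source:
--         return []  # inalcanzable
--     return path
--
-- def build_next_hops(prev: Dict[Node, Optional[Node]], source: Node) -> Dict[Node, Optional[Node]]:
--     """
--     Construye la tabla de next-hop desde 'source' hacia todos los destinos alcanzables.
--     Para cada destino d != source:
--       - next_hop[d] = primer salto desde source siguiendo 'prev' hasta d
--     Si d inalcanzable -> None.
--     """
--     next_hop: Dict[Node, Optional[Node]] = {}
--     for dest in prev.keys():
--         if dest == source:
--             next_hop[dest] = None
--             continue
--         hop = _first_hop(prev, source, dest)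
--         next_hop[dest] = hop
--     return next_hop
--
-- def _first_hop(prev: Dict[Node, Optional[Node]], source: Node, dest: Node) -> Optional[Node]:
--     # Recorre hacia atrás: dest <- ... <- source, y toma el nodo justo después de source
--     path = reconstruct_path(prev, source, dest)
--     if not path or path[0] != source or len(path) < 2:
--         return None
--     return path[1]
-- ===== SOURCE B (Python) =====
-- def build_next_hops(prev, source):
--     # Single backward walk per unmemoized node with path compression: each chain's
--     # shared first hop is stored for every node on the chain.
--     memo = {source: None}
--     for dest in prev:
--         chain = []
--         cur = dest
--         while cur not in memo:
--             chain.append(cur)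
--             nxt = prev.get(cur)
--             if nxt == source:
--                 h = cur
--                 break
--             if nxt is None:
--                 h = None
--                 break
--             cur = nxt
--         else:
--             h = memo[cur]
--         for x in chain:
--             memo[x] = h
--     return {d: memo[d] for d in prev}
-- ===== Notes on version B (the rewrite author's own statement) =====
-- stated objective: alternative
-- what changed: B replaces A's per-destination path reconstruction (rebuild the whole source->dest path, reverse it, take path[1]) with a single memoized backward walk with path compression: each predecessor chain is walked once and its shared first hop is stored for every node on it.
import Mathlib
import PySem

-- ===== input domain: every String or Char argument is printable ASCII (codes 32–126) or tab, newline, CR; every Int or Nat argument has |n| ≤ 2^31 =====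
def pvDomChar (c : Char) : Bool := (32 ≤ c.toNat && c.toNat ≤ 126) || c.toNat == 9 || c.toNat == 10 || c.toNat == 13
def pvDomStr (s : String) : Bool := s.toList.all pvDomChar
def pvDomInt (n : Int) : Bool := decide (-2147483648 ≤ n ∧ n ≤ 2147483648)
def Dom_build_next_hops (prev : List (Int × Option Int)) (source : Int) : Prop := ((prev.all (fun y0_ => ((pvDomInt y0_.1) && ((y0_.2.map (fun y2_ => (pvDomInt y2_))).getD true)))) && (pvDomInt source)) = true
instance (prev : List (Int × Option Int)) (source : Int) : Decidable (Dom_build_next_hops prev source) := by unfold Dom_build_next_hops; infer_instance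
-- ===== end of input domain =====

-- B replaces A's per-destination path reconstruction with one memoized backward walk
-- (path compression), a structurally different algorithm; equivalence is about the return value.

-- prev.get(cur): dict get; a stored None and a missing key both give Python None → Option.join
def pvPrevGet (prev : List (Int × Option Int)) (cur : Int) : Option Int :=
  ((PySem.Dict.mk prev).get? cur).join

-- fuel bound used by both ports' while-loops; under Pre_ every walk halts within it
def pvF (prev : List (Int × Option Int)) : Nat := prev.length + 2

-- ===== PORT A =====
-- 'while cur is not None: path.append(cur); if cur == source: break; cur = prev.get(cur)'
def pvRLoop (prev : List (Int × Option Int)) (source : Int) :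
    Nat → Int → List Int → List Int
  | 0, _, path => path          -- fuel exhausted: unreachable under Pre_
  | k+1, cur, path =>
    let path := path ++ [cur]
    if cur = source then path
    else
      match pvPrevGet prev cur with
      | none => path            -- cur became None: while-condition fails
      | some p => pvRLoop prev source k p path

def pvReconstructPath (prev : List (Int × Option Int)) (source target : Int) : List Int :=
  let path := (pvRLoop prev source (pvF prev) target []).reverse
  match path with
  | [] => []
  | h :: _ => if h ≠ source then [] else path

def pvFirstHop (prev : List (Int × Option Int)) (source dest : Int) : Option Int :=
  let path := pvReconstructPath prev source dest
  if path = [] then none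
  else if path.head? ≠ some source then none
  else if path.length < 2 then none
  else PySem.List.pyGet? path 1   -- path[1]; some _ because len(path) ≥ 2

def build_next_hops (prev : List (Int × Option Int)) (source : Int) : List (Int × Option Int) :=
  (prev.foldl
    (fun (nh : PySem.Dict Int (Option Int)) p =>
      if p.1 = source then nh.insert p.1 none
      else nh.insert p.1 (pvFirstHop prev source p.1))
    PySem.Dict.empty).items

-- ===== PORT B =====
-- inner 'while cur not in memo: …' of Source B; returns (chain, h)
def pvBWalk (prev : List (Int × Option Int)) (source : Int)
    (memo : PySem.Dict Int (Option Int)) :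
    Nat → Int → List Int → List Int × Option Int
  | 0, _, chain => (chain, none)  -- fuel exhausted: unreachable under Pre_
  | k+1, cur, chain =>
    match memo.get? cur with
    | some h => (chain, h)        -- while-condition fails: h = memo[cur]
    | none =>
      let chain := chain ++ [cur]
      match pvPrevGet prev cur with
      | some nxt =>
        if nxt = source then (chain, some cur)
        else pvBWalk prev source memo k nxt chain
      | none => (chain, none)

def build_next_hops_alt (prev : List (Int × Option Int)) (source : Int) : List (Int × Option Int) :=
  let memo0 : PySem.Dict Int (Option Int) := PySem.Dict.empty.insert source none
  let memo := prev.foldl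
    (fun memo p =>
      let r := pvBWalk prev source memo (pvF prev) p.1 []
      r.1.foldl (fun m x => m.insert x r.2) memo)
    memo0
  (prev.foldl
    (fun (d : PySem.Dict Int (Option Int)) p => d.insert p.1 ((memo.get? p.1).join))
    PySem.Dict.empty).items   -- memo[d]; present for every key under Pre_

-- ===== PRECONDITION & SPEC =====
-- one backward step of the predecessor walk; 'none' = the walk has halted (source or a
-- None/missing predecessor was reached)
def pvStep (prev : List (Int × Option Int)) (source : Int) : Option Int → Option Int
  | none => none
  | some c => if c = source then none else pvPrevGet prev c

-- Pre_ excludes exactly the prev maps with a predecessor cycle reachable from some key, on which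
-- A's while-loop never terminates: from every key the backward walk must halt within |prev| + 2
-- steps (by pigeonhole any halting walk halts within that many steps).
def Pre_build_next_hops (prev : List (Int × Option Int)) (source : Int) : Prop :=
  ∀ p ∈ prev, (pvStep prev source)^[pvF prev] (some p.1) = none
instance (prev : List (Int × Option Int)) (source : Int) : Decidable (Pre_build_next_hops prev source) := by unfold Pre_build_next_hops; infer_instance

def pvWitness_build_next_hops : (List (Int × Option Int)) × Int := ([(2, some 1), (3, some 2), (1, none)], 1)

def Spec_build_next_hops (prev : List (Int × Option Int)) (source : Int) (out : List (Int × Option Int)) : Prop := out = build_next_hops_alt prev source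
instance (prev : List (Int × Option Int)) (source : Int) (out : List (Int × Option Int)) : Decidable (Spec_build_next_hops prev source out) := by unfold Spec_build_next_hops; infer_instance

-- ===== CLAIM (what is proved, stated in full; the proofs are below) =====
def Claim_equal_build_next_hops : Prop := ∀ (prev : List (Int × Option Int)) (source : Int), Dom_build_next_hops prev source → Pre_build_next_hops prev source → Spec_build_next_hops prev source (build_next_hops prev source)

-- ===== LEMMAS AND PROOFS =====

-- proof-side fuelled form of the halting condition of Pre_
def pvChainDone (prev : List (Int × Option Int)) (source : Int) : Nat → Int → Bool
  | 0, _ => false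
  | k+1, c =>
    if c = source then true
    else
      match pvPrevGet prev c with
      | none => true
      | some p => pvChainDone prev source k p

theorem pvStep_none (prev : List (Int × Option Int)) (source : Int) (k : Nat) :
    (pvStep prev source)^[k] none = none :=
  Function.iterate_fixed rfl k

theorem pvChainDone_iterate (prev : List (Int × Option Int)) (source : Int) :
    ∀ k c, pvChainDone prev source k c = true ↔ (pvStep prev source)^[k] (some c) = none := by
  intro k
  induction k with
  | zero => intro c; simp [pvChainDone]
  | succ k ih =>
    intro c
    rw [Function.iterate_succ_apply]
    by_cases hc : c = source
    · simp [pvChainDone, hc, pvStep, pvStep_none]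
    · cases hg : pvPrevGet prev c with
      | none => simp [pvChainDone, hc, hg, pvStep, pvStep_none]
      | some p => simp [pvChainDone, hc, hg, pvStep, ih p]

-- the common value both programs assign to a destination: the first hop along the chain
def pvHop (prev : List (Int × Option Int)) (source : Int) : Nat → Int → Option Int
  | 0, _ => none
  | k+1, c =>
    match pvPrevGet prev c with
    | none => none
    | some p => if p = source then some c else pvHop prev source k p

def pvTv (prev : List (Int × Option Int)) (source : Int) (c : Int) : Option Int :=
  if c = source then none else pvHop prev source (pvF prev) c

theorem pvChainDone_mono (prev : List (Int × Option Int)) (source : Int) :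
    ∀ k m c, pvChainDone prev source k c = true → k ≤ m →
      pvChainDone prev source m c = true := by
  intro k
  induction k with
  | zero => intro m c h; simp [pvChainDone] at h
  | succ k ih =>
    intro m c h hkm
    obtain ⟨m', rfl⟩ : ∃ m', m = m' + 1 := ⟨m - 1, by omega⟩
    simp only [pvChainDone] at h ⊢
    split at h
    · simp [*]
    · rename_i hc
      simp only [if_neg hc]
      cases hg : pvPrevGet prev c with
      | none => simp
      | some p => rw [hg] at h; exact ih m' p h (by omega)

theorem pvHop_irrel (prev : List (Int × Option Int)) (source : Int) :
    ∀ k m c, c ≠ source → pvChainDone prev source k c = true → k ≤ m →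
      pvHop prev source m c = pvHop prev source k c := by
  intro k
  induction k with
  | zero => intro m c _ h; simp [pvChainDone] at h
  | succ k ih =>
    intro m c hc h hkm
    obtain ⟨m', rfl⟩ : ∃ m', m = m' + 1 := ⟨m - 1, by omega⟩
    simp only [pvChainDone, if_neg hc] at h
    simp only [pvHop]
    cases hg : pvPrevGet prev c with
    | none => rfl
    | some p =>
      rw [hg] at h
      by_cases hp : p = source
      · simp [hp]
      · simp only [if_neg hp]
        exact ih m' p hp h (by omega)

theorem pvRLoop_append (prev : List (Int × Option Int)) (source : Int) :
    ∀ k c acc, pvRLoop prev source k c acc = acc ++ pvRLoop prev source k c [] := by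
  intro k
  induction k with
  | zero => intro c acc; simp [pvRLoop]
  | succ k ih =>
    intro c acc
    by_cases hc : c = source
    · simp [pvRLoop, hc]
    · cases hg : pvPrevGet prev c with
      | none => simp [pvRLoop, hg]
      | some p =>
        simp only [pvRLoop, if_neg hc, hg]
        rw [ih p (acc ++ [c]), ih p ([] ++ [c])]
        simp

-- characterization of A's backward walk: the reversed path starts with source followed by
-- the hop exactly when pvHop finds one
theorem pvRLoop_char (prev : List (Int × Option Int)) (source : Int) :
    ∀ k c, pvChainDone prev source k c = true → c ≠ source →
      (∃ b l, pvHop prev source k c = some b ∧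
        (pvRLoop prev source k c []).reverse = source :: b :: l) ∨
      (pvHop prev source k c = none ∧
        ∃ x l, (pvRLoop prev source k c []).reverse = x :: l ∧ x ≠ source) := by
  intro k
  induction k with
  | zero => intro c h; simp [pvChainDone] at h
  | succ k ih =>
    intro c h hc
    simp only [pvChainDone, if_neg hc] at h
    cases hg : pvPrevGet prev c with
    | none =>
      have hr : pvRLoop prev source (k+1) c [] = [c] := by
        simp [pvRLoop, hg]
      have hh : pvHop prev source (k+1) c = none := by simp [pvHop, hg]
      exact Or.inr ⟨hh, c, [], by simp [hr], hc⟩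
    | some p =>
      rw [hg] at h
      have hr : pvRLoop prev source (k+1) c [] = c :: pvRLoop prev source k p [] := by
        simp only [pvRLoop, if_neg hc, hg]
        rw [pvRLoop_append prev source k p ([] ++ [c])]
        simp
      obtain ⟨k', rfl⟩ : ∃ k', k = k' + 1 := by
        cases k with
        | zero => simp [pvChainDone] at h
        | succ k' => exact ⟨k', rfl⟩
      by_cases hp : p = source
      · have hh : pvHop prev source (k'+1+1) c = some c := by
          simp [pvHop, hg, hp]
        have hrp : pvRLoop prev source (k'+1) p [] = [source] := by
          simp [pvRLoop, hp]
        exact Or.inl ⟨c, [], hh, by simp [hr, hrp]⟩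
      · have hh : pvHop prev source (k'+1+1) c = pvHop prev source (k'+1) p := by
          simp [pvHop, hg, hp]
        rcases ih p h hp with ⟨b, l, hb, hrev⟩ | ⟨hn, x, l, hrev, hx⟩
        · exact Or.inl ⟨b, l ++ [c], by rw [hh, hb], by simp [hr, hrev]⟩
        · exact Or.inr ⟨by rw [hh, hn], x, l ++ [c], by simp [hr, hrev], hx⟩

theorem pvFirstHop_eq_tv (prev : List (Int × Option Int)) (source dest : Int)
    (h : pvChainDone prev source (pvF prev) dest = true) (hd : dest ≠ source) :
    pvFirstHop prev source dest = pvHop prev source (pvF prev) dest := by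
  unfold pvFirstHop pvReconstructPath
  rcases pvRLoop_char prev source (pvF prev) dest h hd with
    ⟨b, l, hb, hrev⟩ | ⟨hn, x, l, hrev, hx⟩
  · rw [hrev, hb]
    simp
  · rw [hrev, hn]
    simp [if_pos hx]

-- invariant of B's memo: source ↦ None, and every entry holds the true value of its key
def pvInv (prev : List (Int × Option Int)) (source : Int)
    (memo : PySem.Dict Int (Option Int)) : Prop :=
  memo.get? source = some none ∧
  ∀ x h, memo.get? x = some h →
    pvChainDone prev source (pvF prev) x = true ∧ h = pvTv prev source x

theorem pvBWalk_char (prev : List (Int × Option Int)) (source : Int) :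
    ∀ k c chain memo, pvInv prev source memo → k ≤ pvF prev →
      pvChainDone prev source k c = true →
      ∃ suf, pvBWalk prev source memo k c chain = (chain ++ suf, pvTv prev source c) ∧
        pvChainDone prev source (pvF prev) c = true ∧
        (∀ x ∈ suf, x ≠ source ∧ pvChainDone prev source (pvF prev) x = true ∧
          pvTv prev source x = pvTv prev source c) ∧
        (memo.get? c = none → c ∈ suf) := by
  intro k
  induction k with
  | zero => intro c chain memo _ _ h; simp [pvChainDone] at h
  | succ k ih =>
    intro c chain memo hinv hkF h
    have hcF : pvChainDone prev source (pvF prev) c = true :=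
      pvChainDone_mono prev source (k+1) (pvF prev) c h hkF
    simp only [pvBWalk]
    cases hm : memo.get? c with
    | some h0 =>
      obtain ⟨_, hv⟩ := hinv
      obtain ⟨_, rfl⟩ := hv c h0 hm
      exact ⟨[], by simp, hcF, by simp, by simp⟩
    | none =>
      have hc : c ≠ source := by
        intro hcs; rw [hcs, hinv.1] at hm; simp at hm
      simp only [pvChainDone, if_neg hc] at h
      obtain ⟨F', hF'⟩ : ∃ F', pvF prev = F' + 1 := ⟨prev.length + 1, rfl⟩
      cases hg : pvPrevGet prev c with
      | none =>
        have htv : pvTv prev source c = none := by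
          simp [pvTv, hF', pvHop, hg]
        exact ⟨[c], by simp [htv], hcF, by
          intro x hx; simp at hx; subst hx
          exact ⟨hc, hcF, rfl⟩, by simp⟩
      | some p =>
        rw [hg] at h
        by_cases hp : p = source
        · have htv : pvTv prev source c = some c := by
            simp [pvTv, if_neg hc, hF', pvHop, hg, hp]
          refine ⟨[c], by simp [hp, htv], hcF, ?_, by simp⟩
          intro x hx; simp at hx; subst hx
          exact ⟨hc, hcF, rfl⟩
        · have hpF : p ≠ source := hp
          have hkF' : k ≤ pvF prev := by omega
          obtain ⟨suf, hres, hpdone, hall, hmem⟩ :=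
            ih p (chain ++ [c]) memo hinv hkF' h
          have htv : pvTv prev source c = pvTv prev source p := by
            have h1 : pvHop prev source (pvF prev) c = pvHop prev source F' p := by
              simp [hF', pvHop, hg, if_neg hp]
            have h2 : pvHop prev source F' p = pvHop prev source k p :=
              pvHop_irrel prev source k F' p hp h (by omega)
            have h3 : pvHop prev source (pvF prev) p = pvHop prev source k p :=
              pvHop_irrel prev source k (pvF prev) p hp h (by omega)
            simp [pvTv, if_neg hc, if_neg hp, h1, h2, h3]
          refine ⟨c :: suf, ?_, hcF, ?_, by simp⟩
          · simp only [if_neg hp, hres, htv]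
            simp
          · intro x hx
            rcases List.mem_cons.mp hx with rfl | hx'
            · exact ⟨hc, hcF, rfl⟩
            · obtain ⟨h1, h2, h3⟩ := hall x hx'
              exact ⟨h1, h2, h3.trans htv.symm⟩

-- writing the same value h to every node of 'chain'
theorem pvMemoWrite_get? (h : Option Int) :
    ∀ (suf : List Int) (memo : PySem.Dict Int (Option Int)) (y : Int),
      (suf.foldl (fun m x => m.insert x h) memo).get? y =
        if y ∈ suf then some h else memo.get? y := by
  intro suf
  induction suf with
  | nil => intro memo y; simp
  | cons x rest ih =>
    intro memo y
    simp only [List.foldl_cons, ih, List.mem_cons]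
    by_cases hy : y ∈ rest
    · simp [hy]
    · by_cases hyx : y = x
      · simp [hyx, PySem.Dict.get?_insert_self]
      · simp [hy, hyx, PySem.Dict.get?_insert_of_ne _ _ hyx]

-- B's outer loop: the invariant holds throughout, old entries survive, processed keys are present
theorem pvOuter (prev : List (Int × Option Int)) (source : Int) :
    ∀ (l : List (Int × Option Int)) (memo : PySem.Dict Int (Option Int)),
      pvInv prev source memo →
      (∀ p ∈ l, pvChainDone prev source (pvF prev) p.1 = true) →
      pvInv prev source (l.foldl
        (fun memo p =>
          let r := pvBWalk prev source memo (pvF prev) p.1 []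
          r.1.foldl (fun m x => m.insert x r.2) memo) memo) ∧
      (∀ y, (memo.get? y).isSome →
        ((l.foldl (fun memo p =>
          let r := pvBWalk prev source memo (pvF prev) p.1 []
          r.1.foldl (fun m x => m.insert x r.2) memo) memo).get? y).isSome) ∧
      (∀ p ∈ l, ((l.foldl (fun memo p =>
          let r := pvBWalk prev source memo (pvF prev) p.1 []
          r.1.foldl (fun m x => m.insert x r.2) memo) memo).get? p.1).isSome) := by
  intro l
  induction l with
  | nil => intro memo hinv _; exact ⟨hinv, fun y hy => hy, by simp⟩
  | cons q rest ih =>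
    intro memo hinv hall
    have hq : pvChainDone prev source (pvF prev) q.1 = true := hall q (by simp)
    obtain ⟨suf, hres, _, hsuf, hmem⟩ :=
      pvBWalk_char prev source (pvF prev) q.1 [] memo hinv (le_refl _) hq
    set memo' := (pvBWalk prev source memo (pvF prev) q.1 []).1.foldl
      (fun m x => m.insert x (pvBWalk prev source memo (pvF prev) q.1 []).2) memo with hmemo'
    have hres1 : (pvBWalk prev source memo (pvF prev) q.1 []).1 = suf := by simp [hres]
    have hres2 : (pvBWalk prev source memo (pvF prev) q.1 []).2 = pvTv prev source q.1 := by
      simp [hres]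
    have hget : ∀ y, memo'.get? y =
        if y ∈ suf then some (pvTv prev source q.1) else memo.get? y := by
      intro y
      rw [hmemo', hres1, hres2, pvMemoWrite_get?]
    have hinv' : pvInv prev source memo' := by
      constructor
      · rw [hget source]
        have : source ∉ suf := fun hs => ((hsuf source hs).1 rfl).elim
        rw [if_neg this]; exact hinv.1
      · intro x hx hxm
        rw [hget x] at hxm
        by_cases hxs : x ∈ suf
        · rw [if_pos hxs] at hxm
          obtain ⟨_, h2, h3⟩ := hsuf x hxs
          exact ⟨h2, by injection hxm with e; rw [← e, h3]⟩
        · rw [if_neg hxs] at hxm; exact hinv.2 x hx hxm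
    have hrest : ∀ p ∈ rest, pvChainDone prev source (pvF prev) p.1 = true :=
      fun p hp => hall p (List.mem_cons_of_mem _ hp)
    obtain ⟨ih1, ih2, ih3⟩ := ih memo' hinv' hrest
    refine ⟨ih1, ?_, ?_⟩
    · intro y hy
      apply ih2
      rw [hget y]
      by_cases hys : y ∈ suf
      · simp [hys]
      · simpa [hys] using hy
    · intro p hp
      rcases List.mem_cons.mp hp with rfl | hp'
      · apply ih2
        rw [hget p.1]
        by_cases hps : p.1 ∈ suf
        · simp [hps]
        · rw [if_neg hps]
          cases hmq : memo.get? p.1 with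
          | some v => simp
          | none => exact absurd (hmem hmq) hps
      · exact ih3 p hp'

-- ===== VERDICT (by name: the statement is the Claim_ definition above) =====
theorem build_next_hops_spec : Claim_equal_build_next_hops := by
  intro prev source _ hpre0
  have hpre : ∀ p ∈ prev, pvChainDone prev source (pvF prev) p.1 = true :=
    fun p hp => (pvChainDone_iterate prev source (pvF prev) p.1).mpr (hpre0 p hp)
  unfold Spec_build_next_hops build_next_hops build_next_hops_alt
  obtain ⟨hinv, _, hpres⟩ := pvOuter prev source prev
    (PySem.Dict.empty.insert source none)
    (by
      constructor
      · exact PySem.Dict.get?_insert_self _ _ _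
      · intro x h hx
        by_cases hxs : x = source
        · rw [hxs, PySem.Dict.get?_insert_self] at hx
          cases hx
          refine ⟨?_, by simp [hxs, pvTv]⟩
          rw [hxs]
          have hdone : ∀ n, pvChainDone prev source (n + 1) source = true :=
            fun n => by simp [pvChainDone]
          exact hdone (prev.length + 1)
        · rw [PySem.Dict.get?_insert_of_ne _ _ hxs] at hx
          simp [PySem.Dict.get?_empty] at hx)
    hpre
  set memo := prev.foldl
    (fun memo p =>
      let r := pvBWalk prev source memo (pvF prev) p.1 []
      r.1.foldl (fun m x => m.insert x r.2) memo)
    (PySem.Dict.empty.insert source none) with hmemo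
  have hval : ∀ p ∈ prev, (memo.get? p.1).join = pvTv prev source p.1 := by
    intro p hp
    have := hpres p hp
    cases hg : memo.get? p.1 with
    | none => rw [hg] at this; simp at this
    | some v =>
      obtain ⟨_, hv⟩ := hinv.2 p.1 v hg
      simp [hv]
  -- both folds insert the same value pvTv for every key of prev
  have hfold : ∀ (l : List (Int × Option Int)) (d : PySem.Dict Int (Option Int)),
      (∀ p ∈ l, p ∈ prev) →
      l.foldl (fun (nh : PySem.Dict Int (Option Int)) p =>
        if p.1 = source then nh.insert p.1 none
        else nh.insert p.1 (pvFirstHop prev source p.1)) d =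
      l.foldl (fun (d : PySem.Dict Int (Option Int)) p =>
        d.insert p.1 ((memo.get? p.1).join)) d := by
    intro l
    induction l with
    | nil => intro d _; rfl
    | cons q rest ih =>
      intro d hsub
      have hqmem : q ∈ prev := hsub q (by simp)
      have hq : (if q.1 = source then d.insert q.1 none
          else d.insert q.1 (pvFirstHop prev source q.1)) =
          d.insert q.1 ((memo.get? q.1).join) := by
        rw [hval q hqmem]
        by_cases hqs : q.1 = source
        · simp [hqs, pvTv]
        · rw [if_neg hqs]
          unfold pvTv
          rw [if_neg hqs, pvFirstHop_eq_tv prev source q.1 (hpre q hqmem) hqs]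
      simp only [List.foldl_cons, hq]
      exact ih _ (fun p hp => hsub p (List.mem_cons_of_mem _ hp))
  rw [hfold prev PySem.Dict.empty (fun p hp => hp)]
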